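-- pv_equiv track=rewrite | github.com/superdeveloper602/auto-import-xml | auto-import-script.py | split_mixed_case
-- ===== SOURCE A (Python) =====
-- import string
--
-- def split_mixed_case(s):
--     result = []
--     current_word = ""
--     counter = 0
--
--     if len(s) <= 3:
--         return s
--
--     for char in s:
--         if char.isupper() or char in string.punctuation or char.isdigit():
--             if counter < 3 and current_word:
--                 return s
--             result.append(current_word)
--             current_word = ""
--             counter = 0
--
--         current_word += char
--         counter += 1
--
--     if counter >= 3:
--         result.append(current_word)
--
--     if len(result) > 1:
--         return " ".join(result)
--     elif len(result) == 1:
--         return result[0]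
--     else:
--         return s
-- ===== SOURCE B (Python) =====
-- import string
--
-- def split_mixed_case(s):
--     n = len(s)
--     if n <= 3:
--         return s
--     # phase 1: positions of boundary chars; slice s into the induced segments
--     cuts = [i for i, c in enumerate(s)
--             if c.isupper() or c in string.punctuation or c.isdigit()]
--     segs = [s[a:e] for a, e in zip([0] + cuts, cuts + [n])]
--     # phase 2: judge the segmentation
--     if any(0 < len(w) < 3 for w in segs[:-1]):
--         return s
--     words = segs if len(segs[-1]) >= 3 else segs[:-1]
--     if len(words) > 1:
--         return " ".join(words)
--     if len(words) == 1:
--         return words[0]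
--     return s
-- ===== Notes on version B (the rewrite author's own statement) =====
-- stated objective: alternative
-- what changed: A's fused accumulator loop (building current_word char by char with a counter and mid-loop early returns) is replaced by an index-based algorithm: one enumerate pass collects the boundary positions, the string is sliced at those positions via zip of adjacent cut indices, and a separate second phase judges the segment list.
import Mathlib
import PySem

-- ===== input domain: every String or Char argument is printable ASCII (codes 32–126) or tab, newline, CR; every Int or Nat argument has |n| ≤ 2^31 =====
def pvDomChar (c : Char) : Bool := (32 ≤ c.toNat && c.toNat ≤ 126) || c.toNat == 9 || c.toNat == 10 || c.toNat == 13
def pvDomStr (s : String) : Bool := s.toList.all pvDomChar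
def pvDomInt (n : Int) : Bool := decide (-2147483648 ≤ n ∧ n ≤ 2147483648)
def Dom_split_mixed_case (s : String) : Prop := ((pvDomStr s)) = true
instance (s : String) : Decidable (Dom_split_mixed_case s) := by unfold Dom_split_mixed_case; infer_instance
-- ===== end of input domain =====

-- B replaces A's fused accumulator loop (current_word + counter + mid-loop early returns) by an
-- index-based algorithm: collect the boundary positions with enumerate, slice the string at the
-- adjacent cut pairs, then judge the segment list in a separate phase (objective: alternative).

-- shared helper: char is uppercase / in string.punctuation / digit (exact on the ASCII domain)
def pvBoundary (c : Char) : Bool :=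
  PySem.Chars.isupper c || "!\"#$%&'()*+,-./:;<=>?@[\\]^_`{|}~".toList.contains c
    || PySem.Chars.isdigit c

-- ===== PORT A =====
-- A's loop: state (result, current_word, counter); `none` = the early `return s`
def pvALoop : List Char → List (List Char) → List Char → Nat → Option (List (List Char))
  | [], result, current_word, counter =>
      some (if 3 ≤ counter then result ++ [current_word] else result)
  | c :: rest, result, current_word, counter =>
      if pvBoundary c then
        if counter < 3 ∧ current_word ≠ [] then none
        else pvALoop rest (result ++ [current_word]) [c] 1
      else pvALoop rest result (current_word ++ [c]) (counter + 1)

def split_mixed_case (s : String) : String :=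
  if s.toList.length ≤ 3 then s
  else
    match pvALoop s.toList [] [] 0 with
    | none => s
    | some result =>
      if 1 < result.length then String.ofList (PySem.Chars.join [' '] result)
      else if result.length = 1 then String.ofList (result.headD [])
      else s

-- ===== PORT B =====
-- 0 < len(w) < 3
def pvShort (w : List Char) : Bool := decide (0 < w.length) && decide (w.length < 3)

-- phase 1a: cuts = [i for i, c in enumerate(s) if boundary(c)]
def pvCutsB (l : List Char) : List Int :=
  ((PySem.List.enumerate l).filter (fun p => pvBoundary p.2)).map Prod.fst

-- phase 1b: segs = [s[a:e] for a, e in zip([0] + cuts, cuts + [n])]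
def pvSegsB (l : List Char) : List (List Char) :=
  (((0 : Int) :: pvCutsB l).zip (pvCutsB l ++ [(l.length : Int)])).map
    (fun p => PySem.List.slice l (some p.1) (some p.2))

def split_mixed_case_alt (s : String) : String :=
  if s.toList.length ≤ 3 then s
  else
    let segs := pvSegsB s.toList
    -- phase 2: judge the segmentation
    if segs.dropLast.any pvShort then s
    else
      let words := if 3 ≤ ((segs.getLast?).getD []).length then segs else segs.dropLast
      if 1 < words.length then String.ofList (PySem.Chars.join [' '] words)
      else if words.length = 1 then String.ofList (words.headD [])
      else s

-- ===== PRECONDITION & SPEC =====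
def Spec_split_mixed_case (s : String) (out : String) : Prop := out = split_mixed_case_alt s
instance (s : String) (out : String) : Decidable (Spec_split_mixed_case s out) := by unfold Spec_split_mixed_case; infer_instance

-- ===== CLAIM (what is proved, stated in full; the proofs are below) =====
def Claim_equal_split_mixed_case : Prop := ∀ (s : String), Dom_split_mixed_case s → Spec_split_mixed_case s (split_mixed_case s)

-- ===== LEMMAS AND PROOFS =====

-- the common characterization of the segment list, by structural recursion on the string
def pvSplitRec : List Char → List (List Char)
  | [] => [[]]
  | c :: l =>
      if pvBoundary c then [] :: (pvSplitRec l).modifyHead (c :: ·)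
      else (pvSplitRec l).modifyHead (c :: ·)

theorem pvSplitRec_ne_nil (l : List Char) : pvSplitRec l ≠ [] := by
  induction l with
  | nil => simp [pvSplitRec]
  | cons c l ih =>
    obtain ⟨a, t, h⟩ := List.exists_cons_of_ne_nil ih
    simp only [pvSplitRec, h]
    split <;> simp [List.modifyHead]

-- ----- A-side: A's accumulation written as appending to the last segment -----
def pvAppendLast : List (List Char) → Char → List (List Char)
  | [], c => [[c]]
  | [w], c => [w ++ [c]]
  | w :: ws, c => w :: pvAppendLast ws c

def pvBSegs : List Char → List (List Char) → List (List Char)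
  | [], segs => segs
  | c :: rest, segs =>
      if pvBoundary c then pvBSegs rest (segs ++ [[c]])
      else pvBSegs rest (pvAppendLast segs c)

theorem pvAppendLast_append (a b : List (List Char)) (c : Char) (hb : b ≠ []) :
    pvAppendLast (a ++ b) c = a ++ pvAppendLast b c := by
  induction a with
  | nil => rfl
  | cons w ws ih =>
    have hne : ws ++ b ≠ [] := fun h => hb (List.append_eq_nil_iff.mp h).2
    obtain ⟨x, xs, hx⟩ := List.exists_cons_of_ne_nil hne
    simp only [List.cons_append]
    rw [hx, show pvAppendLast (w :: x :: xs) c = w :: pvAppendLast (x :: xs) c from rfl,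
      ← hx, ih]

theorem pvBSegs_append (l : List Char) (a b : List (List Char)) (hb : b ≠ []) :
    pvBSegs l (a ++ b) = a ++ pvBSegs l b := by
  induction l generalizing b with
  | nil => simp [pvBSegs]
  | cons c rest ih =>
    simp only [pvBSegs]
    split
    · rw [List.append_assoc, ih _ (by simp)]
    · rw [pvAppendLast_append _ _ _ hb, ih]
      cases b with
      | nil => exact absurd rfl hb
      | cons w ws => cases ws <;> simp [pvAppendLast]

theorem pvBSegs_single (l : List Char) (w : List Char) :
    pvBSegs l [w] = (pvSplitRec l).modifyHead (w ++ ·) := by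
  induction l generalizing w with
  | nil => simp [pvBSegs, pvSplitRec]
  | cons c rest ih =>
    obtain ⟨h, t, hS⟩ := List.exists_cons_of_ne_nil (pvSplitRec_ne_nil rest)
    simp only [pvBSegs, pvSplitRec]
    by_cases hb : pvBoundary c
    · simp only [hb, if_true]
      rw [pvBSegs_append rest [w] [[c]] (by simp), ih [c], hS]
      simp [List.modifyHead]
    · simp only [hb, Bool.false_eq_true, if_false]
      rw [show pvAppendLast [w] c = [w ++ [c]] from rfl, ih (w ++ [c]), hS]
      simp [List.modifyHead]

theorem pvBSegs_nil_start (l : List Char) : pvBSegs l [[]] = pvSplitRec l := by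
  rw [pvBSegs_single]
  obtain ⟨h, t, hS⟩ := List.exists_cons_of_ne_nil (pvSplitRec_ne_nil l)
  rw [hS]; simp [List.modifyHead]

def pvKept (t : List (List Char)) : List (List Char) :=
  if 3 ≤ ((t.getLast?).getD []).length then t else t.dropLast

def pvRender (r : List (List Char)) (s : String) : String :=
  if 1 < r.length then String.ofList (PySem.Chars.join [' '] r)
  else if r.length = 1 then String.ofList (r.headD []) else s

theorem pvALoop_eq (l : List Char) (result : List (List Char)) (cw : List Char) :
    pvALoop l result cw cw.length =
      (if (pvBSegs l [cw]).dropLast.any pvShort then none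
       else some (result ++ pvKept (pvBSegs l [cw]))) := by
  induction l generalizing result cw with
  | nil =>
    simp only [pvALoop, pvBSegs, pvKept, List.dropLast, List.any_nil,
      if_neg Bool.false_ne_true]
    by_cases h : 3 ≤ cw.length <;> simp [h]
  | cons c rest ih =>
    simp only [pvALoop, pvBSegs]
    by_cases hb : pvBoundary c
    · simp only [hb, if_true]
      have hsplit : pvBSegs rest ([cw] ++ [[c]]) = [cw] ++ pvBSegs rest [[c]] :=
        pvBSegs_append rest [cw] [[c]] (by simp)
      simp only [List.singleton_append] at hsplit ⊢
      rw [hsplit]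
      have hne : pvBSegs rest [[c]] ≠ [] := by
        rw [pvBSegs_single]
        obtain ⟨x, xs, hx⟩ := List.exists_cons_of_ne_nil (pvSplitRec_ne_nil rest)
        rw [hx]; simp [List.modifyHead]
      set t := pvBSegs rest [[c]] with ht
      obtain ⟨x, xs, hx⟩ := List.exists_cons_of_ne_nil hne
      have hdl : (cw :: t).dropLast = cw :: t.dropLast := by rw [hx]; rfl
      have hkept : pvKept (cw :: t) = cw :: pvKept t := by
        rw [hx]
        unfold pvKept
        rw [List.getLast?_cons_cons]
        split
        · rfl
        · rfl
      rw [hdl, hkept]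
      by_cases hshort : cw.length < 3 ∧ cw ≠ []
      · have hS : pvShort cw = true := by
          simp only [pvShort, Bool.and_eq_true, decide_eq_true_eq]
          exact ⟨List.length_pos_iff.mpr hshort.2, hshort.1⟩
        simp [hshort, hS]
      · have hS : pvShort cw = false := by
          simp only [pvShort, Bool.and_eq_false_iff, decide_eq_false_iff_not, not_lt]
          rcases Decidable.em (cw = []) with h0 | h0
          · left; simp [h0]
          · have h1 : ¬ cw.length < 3 := fun h => hshort ⟨h, h0⟩
            right; omega
        rw [if_neg hshort, show (1 : Nat) = ([c] : List Char).length from rfl, ih, ← ht]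
        simp only [List.any_cons, hS, Bool.false_or]
        split
        · rfl
        · rw [List.append_assoc]
          rfl
    · simp only [hb, if_false, Bool.false_eq_true]
      rw [show cw.length + 1 = (cw ++ [c]).length by simp, ih]
      rfl

-- ----- B-side: the zip-of-cuts slicing reduces to pvSplitRec -----
def pvNatCuts : List Char → List Nat
  | [] => []
  | c :: l => (if pvBoundary c then [0] else []) ++ (pvNatCuts l).map (· + 1)

theorem pvCuts_eq (l : List Char) (s : Int) :
    ((PySem.List.enumerate l s).filter (fun p => pvBoundary p.2)).map Prod.fst
      = (pvNatCuts l).map (fun (k : Nat) => (k : Int) + s) := by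
  induction l generalizing s with
  | nil => simp [PySem.List.enumerate_nil, pvNatCuts]
  | cons c l ih =>
    rw [PySem.List.enumerate_cons, List.filter_cons]
    have htail : ((pvNatCuts l).map (· + 1)).map (fun (k : Nat) => (k : Int) + s)
        = (pvNatCuts l).map (fun (k : Nat) => (k : Int) + (s + 1)) := by
      rw [List.map_map]
      refine List.map_congr_left (fun k _ => ?_)
      show ((k + 1 : Nat) : Int) + s = (k : Int) + (s + 1)
      push_cast; ring
    by_cases hb : pvBoundary c
    · rw [if_pos (by simpa using hb)]
      rw [List.map_cons, ih (s + 1)]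
      simp only [pvNatCuts, hb, if_true, List.singleton_append, List.map_cons]
      rw [htail]
      simp
    · rw [if_neg (by simpa using hb)]
      rw [ih (s + 1)]
      simp only [pvNatCuts, hb, Bool.false_eq_true, if_false, List.nil_append]
      rw [htail]

def pvSliceOf (l : List Char) (p : Nat × Nat) : List Char := (l.drop p.1).take (p.2 - p.1)

def pvAdjPairs : Nat → List Nat → Nat → List (Nat × Nat)
  | a, [], n => [(a, n)]
  | a, k :: K, n => (a, k) :: pvAdjPairs k K n

theorem pvZip_eq_adjPairs (K : List Nat) (a n : Nat) :
    (a :: K).zip (K ++ [n]) = pvAdjPairs a K n := by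
  induction K generalizing a with
  | nil => rfl
  | cons k K ih => simpa [pvAdjPairs, List.zip] using ih k

theorem pvAdj_shift (l : List Char) (c : Char) (K : List Nat) (a n : Nat) :
    (pvAdjPairs (a + 1) (K.map (· + 1)) (n + 1)).map (pvSliceOf (c :: l))
      = (pvAdjPairs a K n).map (pvSliceOf l) := by
  induction K generalizing a with
  | nil => simp [pvAdjPairs, pvSliceOf, Nat.succ_sub_succ]
  | cons k K ih =>
    simp only [List.map_cons, pvAdjPairs, List.map]
    rw [ih k]
    congr 1
    simp [pvSliceOf, Nat.succ_sub_succ]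

theorem pvAdj_head (l : List Char) (c : Char) (K : List Nat) (n : Nat) :
    (pvAdjPairs 0 (K.map (· + 1)) (n + 1)).map (pvSliceOf (c :: l))
      = ((pvAdjPairs 0 K n).map (pvSliceOf l)).modifyHead (c :: ·) := by
  cases K with
  | nil => simp [pvAdjPairs, pvSliceOf, List.modifyHead]
  | cons k K =>
    simp only [List.map_cons, pvAdjPairs, List.map, List.modifyHead]
    rw [pvAdj_shift]
    simp [pvSliceOf]

theorem pvSegs_eq (l : List Char) :
    (pvAdjPairs 0 (pvNatCuts l) l.length).map (pvSliceOf l) = pvSplitRec l := by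
  induction l with
  | nil => simp [pvNatCuts, pvAdjPairs, pvSliceOf, pvSplitRec]
  | cons c l ih =>
    simp only [pvNatCuts, pvSplitRec, List.length_cons]
    by_cases hb : pvBoundary c
    · simp only [hb, if_true, List.singleton_append]
      rw [show pvAdjPairs 0 (0 :: (pvNatCuts l).map (· + 1)) (l.length + 1)
            = (0, 0) :: pvAdjPairs 0 ((pvNatCuts l).map (· + 1)) (l.length + 1) from rfl]
      rw [List.map_cons, pvAdj_head, ih]
      rfl
    · simp only [hb, Bool.false_eq_true, if_false, List.nil_append]
      rw [pvAdj_head, ih]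

theorem pvSegsB_eq (l : List Char) : pvSegsB l = pvSplitRec l := by
  have hc : pvCutsB l = (pvNatCuts l).map (fun (k : Nat) => (k : Int)) := by
    unfold pvCutsB
    rw [pvCuts_eq l 0]
    exact List.map_congr_left (fun k _ => by simp)
  unfold pvSegsB
  rw [hc,
    show ((0 : Int) :: (pvNatCuts l).map (fun (k : Nat) => (k : Int)))
      = ((0 :: pvNatCuts l).map (fun (k : Nat) => (k : Int))) from by simp,
    show ((pvNatCuts l).map (fun (k : Nat) => (k : Int)) ++ [(l.length : Int)])
      = ((pvNatCuts l ++ [l.length]).map (fun (k : Nat) => (k : Int))) from by simp,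
    List.zip_map, pvZip_eq_adjPairs, List.map_map, ← pvSegs_eq l]
  refine List.map_congr_left (fun p _ => ?_)
  show PySem.List.slice l (some ((p.1 : Nat) : Int)) (some ((p.2 : Nat) : Int)) = pvSliceOf l p
  rw [PySem.List.slice_natCast]
  rfl

-- ===== VERDICT (by name: the statement is the Claim_ definition above) =====
theorem split_mixed_case_spec : Claim_equal_split_mixed_case := by
  intro s _
  unfold Spec_split_mixed_case
  have hA : split_mixed_case s =
      (if s.toList.length ≤ 3 then s
       else match pvALoop s.toList [] [] 0 with
         | none => s
         | some r => pvRender r s) := rfl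
  have hB : split_mixed_case_alt s =
      (if s.toList.length ≤ 3 then s
       else if (pvSegsB s.toList).dropLast.any pvShort then s
       else pvRender (pvKept (pvSegsB s.toList)) s) := rfl
  rw [hA, hB, pvSegsB_eq]
  by_cases hlen : s.toList.length ≤ 3
  · rw [if_pos hlen, if_pos hlen]
  · rw [if_neg hlen, if_neg hlen,
      show (0 : Nat) = ([] : List Char).length from rfl, pvALoop_eq,
      List.nil_append, pvBSegs_nil_start]
    by_cases hany : (pvSplitRec s.toList).dropLast.any pvShort = true
    · rw [if_pos hany, if_pos hany]
    · rw [if_neg hany, if_neg hany]
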